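-- pv_equiv track=rewrite | github.com/chrisandoryan/Nethive-Project | processors/sql_tokenizer.py | convert_orphan_parentheses
-- ===== SOURCE A (Python) =====
-- def convert_orphan_parentheses(expression):
--     opening = tuple('(')
--     closing = tuple(')')
--     mapping = dict(zip(opening, closing))
--     queue = []
--     expression = list(expression)
--     for i, letter in enumerate(expression):
--         if letter in opening:
--             queue.append({'c': mapping[letter], 'idx': i})
--         elif letter in closing:
--             if not queue or letter != queue.pop()['c']:
--                 if letter is ')':
--                     expression[i] = ' RPRN '
--                 elif letter is '(':
--                     expression[i] = ' LPRN '
--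
--     for x in queue:
--         if x['c'] is '(':
--             expression[x['idx']] = ' RPRN '
--         elif x['c'] is ')':
--             expression[x['idx']] = ' LPRN '
--
--     return ''.join(expression)
-- ===== SOURCE B (Python) =====
-- def convert_orphan_parentheses(expression):
--     chars = list(expression)
--     open_balance = 0
--     for i, c in enumerate(chars):
--         if c == '(':
--             open_balance += 1
--         elif c == ')':
--             if open_balance > 0:
--                 open_balance -= 1
--             else:
--                 chars[i] = ' RPRN '
--     close_balance = 0
--     for i in range(len(chars) - 1, -1, -1):
--         c = chars[i]
--         if c == ')':
--             close_balance += 1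
--         elif c == '(':
--             if close_balance > 0:
--                 close_balance -= 1
--             else:
--                 chars[i] = ' LPRN '
--     return ''.join(chars)
-- ===== Notes on version B (the rewrite author's own statement) =====
-- stated objective: alternative
-- what changed: Replaces A's index-stack of pending open-paren positions plus an end-of-loop stack drain with two independent balance-counter passes: a left-to-right pass marking orphan closers when the open counter is zero, and a right-to-left pass marking orphan openers when the close counter is zero.
import Mathlib
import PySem

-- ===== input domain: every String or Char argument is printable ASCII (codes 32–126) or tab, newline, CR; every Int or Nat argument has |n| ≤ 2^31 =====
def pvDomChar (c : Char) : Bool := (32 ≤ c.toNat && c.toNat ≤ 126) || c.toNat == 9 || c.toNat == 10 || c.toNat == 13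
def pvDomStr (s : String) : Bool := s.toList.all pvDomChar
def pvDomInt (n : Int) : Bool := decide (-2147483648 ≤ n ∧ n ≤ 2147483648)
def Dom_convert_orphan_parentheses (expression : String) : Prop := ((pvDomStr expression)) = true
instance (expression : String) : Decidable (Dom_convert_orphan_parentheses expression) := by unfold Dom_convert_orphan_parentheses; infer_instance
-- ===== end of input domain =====

-- B replaces A's index-stack + end-drain with two balance-counter passes (left-to-right for orphan ')', right-to-left for orphan '('); objective: alternative decomposition, same cost.

-- ===== PORT A =====
-- Python's `letter is ')'` on interned 1-char strings behaves as equality; ported as =.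
-- Python iterates the mutated list, but mutations happen only at indices already passed,
-- so enumerating the original characters is exact; expression[i] holds 1-char strings → List String.
def pvLoopA : List (Int × Char) → List String × List (String × Int) → List String × List (String × Int)
  | [], st => st
  | (i, letter) :: rest, (expr, queue) =>
    if letter = '(' then
      pvLoopA rest (expr, queue ++ [(")", i)])     -- mapping['('] = ')'
    else if letter = ')' then
      match PySem.List.pop? queue (-1) with        -- queue.pop(), guarded by `not queue`
      | none =>
        pvLoopA rest ((if letter = ')' then expr.set i.toNat " RPRN "
                       else if letter = '(' then expr.set i.toNat " LPRN " else expr), queue)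
      | some (top, queue') =>
        if letter.toString ≠ top.1 then
          pvLoopA rest ((if letter = ')' then expr.set i.toNat " RPRN "
                         else if letter = '(' then expr.set i.toNat " LPRN " else expr), queue')
        else pvLoopA rest (expr, queue')
    else pvLoopA rest (expr, queue)

def pvFinishA : List (String × Int) → List String → List String
  | [], expr => expr
  | (c, idx) :: rest, expr =>
      pvFinishA rest (if c = "(" then expr.set idx.toNat " RPRN "
                      else if c = ")" then expr.set idx.toNat " LPRN " else expr)

def convert_orphan_parentheses (expression : String) : String :=
  let st := pvLoopA (PySem.List.enumerate expression.toList 0)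
              (expression.toList.map Char.toString, [])
  PySem.Str.join "" (pvFinishA st.2 st.1)

-- ===== PORT B =====
-- pass 1, left to right: open_balance counter, orphan ')' ↦ " RPRN "
def pvPass1 : List Char → Nat → List String
  | [], _ => []
  | c :: cs, bal =>
    if c = '(' then "(" :: pvPass1 cs (bal + 1)
    else if c = ')' then
      if bal > 0 then ")" :: pvPass1 cs (bal - 1) else " RPRN " :: pvPass1 cs bal
    else c.toString :: pvPass1 cs bal

-- pass 2, right to left (input and output reversed): close_balance counter, orphan '(' ↦ " LPRN "
def pvPass2 : List String → Nat → List String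
  | [], _ => []
  | s :: ss, bal =>
    if s = ")" then s :: pvPass2 ss (bal + 1)
    else if s = "(" then
      if bal > 0 then s :: pvPass2 ss (bal - 1) else " LPRN " :: pvPass2 ss bal
    else s :: pvPass2 ss bal

def convert_orphan_parentheses_alt (expression : String) : String :=
  PySem.Str.join "" ((pvPass2 (pvPass1 expression.toList 0).reverse 0).reverse)

-- ===== PRECONDITION & SPEC =====
def Spec_convert_orphan_parentheses (expression : String) (out : String) : Prop := out = convert_orphan_parentheses_alt expression
instance (expression : String) (out : String) : Decidable (Spec_convert_orphan_parentheses expression out) := by unfold Spec_convert_orphan_parentheses; infer_instance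

-- ===== CLAIM (what is proved, stated in full; the proofs are below) =====
def Claim_equal_convert_orphan_parentheses : Prop := ∀ (expression : String), Dom_convert_orphan_parentheses expression → Spec_convert_orphan_parentheses expression (convert_orphan_parentheses expression)

-- ===== LEMMAS AND PROOFS =====

-- Intermediate "zipper" machine: acc = current segment, stk = segments interrupted by a
-- still-unmatched '('. Both ports are proved equal to pvR.
def pvGlue (stk : List (List String)) (acc : List String) : List String :=
  stk.foldl (fun below seg => seg ++ "(" :: below) acc

def pvFin (stk : List (List String)) (acc : List String) : List String :=
  stk.foldl (fun below seg => seg ++ " LPRN " :: below) acc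

def pvR : List Char → List (List String) → List String → List String
  | [], stk, acc => pvFin stk acc
  | c :: cs, stk, acc =>
    if c = '(' then pvR cs (acc :: stk) []
    else if c = ')' then
      match stk with
      | [] => pvR cs [] (acc ++ [" RPRN "])
      | a :: stk' => pvR cs stk' (a ++ "(" :: acc ++ [")"])
    else pvR cs stk (acc ++ [c.toString])

-- A's queue, reconstructed from the machine state
def pvQs : List (List String) → List (String × Int)
  | [] => []
  | t :: rest => pvQs rest ++ [(")", ((pvGlue rest t).length : Int))]

-- pass 2 with its final balance
def pvP2 : List String → Nat → List String × Nat
  | [], b => ([], b)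
  | s :: ss, b =>
    if s = ")" then ((s :: (pvP2 ss (b + 1)).1), (pvP2 ss (b + 1)).2)
    else if s = "(" then
      if b > 0 then ((s :: (pvP2 ss (b - 1)).1), (pvP2 ss (b - 1)).2)
      else ((" LPRN " :: (pvP2 ss b).1), (pvP2 ss b).2)
    else ((s :: (pvP2 ss b).1), (pvP2 ss b).2)

-- "balanced segment": pass 2 walks through it unchanged, at any balance
def pvBal (es : List String) : Prop := ∀ b, pvP2 es.reverse b = (es.reverse, b)

theorem pvPass2_eq_P2 (ss : List String) (b : Nat) : pvPass2 ss b = (pvP2 ss b).1 := by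
  induction ss generalizing b with
  | nil => rfl
  | cons t ss ih => simp only [pvPass2, pvP2]; split_ifs <;> simp [ih]

theorem pvP2_append (x y : List String) (b : Nat) :
    pvP2 (x ++ y) b = ((pvP2 x b).1 ++ (pvP2 y (pvP2 x b).2).1, (pvP2 y (pvP2 x b).2).2) := by
  induction x generalizing b with
  | nil => simp [pvP2]
  | cons t x ih => simp only [List.cons_append, pvP2]; split_ifs <;> simp [ih]

theorem pvGlue_append (stk : List (List String)) (x y : List String) :
    pvGlue stk (x ++ y) = pvGlue stk x ++ y := by
  induction stk generalizing x with
  | nil => rfl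
  | cons t rest ih =>
    show pvGlue rest (t ++ "(" :: (x ++ y)) = pvGlue rest (t ++ "(" :: x) ++ y
    rw [← ih]; congr 1; simp

theorem pvFin_append (stk : List (List String)) (x y : List String) :
    pvFin stk (x ++ y) = pvFin stk x ++ y := by
  induction stk generalizing x with
  | nil => rfl
  | cons t rest ih =>
    show pvFin rest (t ++ " LPRN " :: (x ++ y)) = pvFin rest (t ++ " LPRN " :: x) ++ y
    rw [← ih]; congr 1; simp

theorem pvGlue_split (stk : List (List String)) (t acc : List String) :
    pvGlue (t :: stk) acc = pvGlue stk t ++ "(" :: acc := by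
  show pvGlue stk (t ++ "(" :: acc) = _
  rw [show t ++ "(" :: acc = (t ++ ["("]) ++ acc by simp, pvGlue_append, pvGlue_append]
  simp

theorem pvFin_split (stk : List (List String)) (t acc : List String) :
    pvFin (t :: stk) acc = pvFin stk t ++ " LPRN " :: acc := by
  show pvFin stk (t ++ " LPRN " :: acc) = _
  rw [show t ++ " LPRN " :: acc = (t ++ [" LPRN "]) ++ acc by simp, pvFin_append, pvFin_append]
  simp

theorem pvLen_fin_glue (stk : List (List String)) (acc : List String) :
    (pvFin stk acc).length = (pvGlue stk acc).length := by
  induction stk generalizing acc with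
  | nil => rfl
  | cons t rest ih =>
    show (pvFin rest (t ++ " LPRN " :: acc)).length = (pvGlue rest (t ++ "(" :: acc)).length
    rw [show t ++ " LPRN " :: acc = (t ++ [" LPRN "]) ++ acc by simp,
        show t ++ "(" :: acc = (t ++ ["("]) ++ acc by simp,
        pvFin_append, pvGlue_append, pvFin_append, pvGlue_append]
    simp [ih]

theorem pvBal_nil : pvBal [] := fun _ => rfl

theorem pvBal_snoc {es : List String} (h : pvBal es) {s : String}
    (h1 : s ≠ ")") (h2 : s ≠ "(") : pvBal (es ++ [s]) := by
  intro b
  rw [show (es ++ [s]).reverse = s :: es.reverse by simp]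
  simp only [pvP2, if_neg h1, if_neg h2, h b]

theorem pvBal_wrap {a acc : List String} (ha : pvBal a) (hacc : pvBal acc) :
    pvBal (a ++ "(" :: acc ++ [")"]) := by
  intro b
  rw [show (a ++ "(" :: acc ++ [")"]).reverse = ")" :: (acc.reverse ++ "(" :: a.reverse) by simp]
  have h1 : pvP2 ("(" :: a.reverse) (b + 1) = ("(" :: a.reverse, b) := by
    simp [pvP2, ha b]
  have h2 : pvP2 (acc.reverse ++ "(" :: a.reverse) (b + 1) = (acc.reverse ++ "(" :: a.reverse, b) := by
    rw [pvP2_append, hacc (b + 1), h1]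
  simp [pvP2, h2]

theorem pvToString_inj {c d : Char} (h : c.toString = d.toString) : c = d := by
  have := congrArg String.toList h; simpa using this

theorem pvSet_middle (u : List String) (x w : String) (v : List String) :
    (u ++ x :: v).set u.length w = u ++ w :: v := by
  simp

-- pass 2 undoes the glue: it marks exactly the unmatched '(' separators
theorem pvP2_glue (stk : List (List String)) : ∀ acc : List String,
    (∀ a ∈ stk, pvBal a) → pvBal acc →
    pvP2 (pvGlue stk acc).reverse 0 = ((pvFin stk acc).reverse, 0) := by
  induction stk with
  | nil => intro acc _ hacc; exact hacc 0
  | cons t rest ih =>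
    intro acc hstk hacc
    rw [pvGlue_split, pvFin_split]
    rw [show (pvGlue rest t ++ "(" :: acc).reverse
          = acc.reverse ++ "(" :: (pvGlue rest t).reverse by simp]
    have h0 : pvP2 ((pvGlue rest t).reverse) 0 = ((pvFin rest t).reverse, 0) :=
      ih t (fun a ha => hstk a (List.mem_cons_of_mem _ ha)) (hstk t List.mem_cons_self)
    have h1 : pvP2 ("(" :: (pvGlue rest t).reverse) 0
        = (" LPRN " :: (pvFin rest t).reverse, 0) := by
      simp [pvP2, h0]
    rw [pvP2_append, hacc 0, h1]
    simp

-- B-side: the machine equals pass2 ∘ pass1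
theorem pvLB (cs : List Char) : ∀ (stk : List (List String)) (acc : List String),
    (∀ a ∈ stk, pvBal a) → pvBal acc →
    pvR cs stk acc = (pvP2 (pvGlue stk acc ++ pvPass1 cs stk.length).reverse 0).1.reverse := by
  induction cs with
  | nil =>
    intro stk acc hstk hacc
    show pvFin stk acc = _
    rw [show pvPass1 [] stk.length = [] from rfl, List.append_nil,
        pvP2_glue stk acc hstk hacc]
    simp
  | cons c cs ih =>
    intro stk acc hstk hacc
    by_cases hc1 : c = '('
    · subst hc1
      rw [show pvR ('(' :: cs) stk acc = pvR cs (acc :: stk) [] from by simp [pvR]]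
      rw [ih (acc :: stk) [] (by
            intro a ha
            rcases List.mem_cons.mp ha with h | h
            · exact h ▸ hacc
            · exact hstk a h) pvBal_nil]
      have harg : pvGlue (acc :: stk) [] ++ pvPass1 cs (acc :: stk).length
          = pvGlue stk acc ++ pvPass1 ('(' :: cs) stk.length := by
        rw [pvGlue_split, show pvPass1 ('(' :: cs) stk.length
              = "(" :: pvPass1 cs (stk.length + 1) from by simp [pvPass1]]
        simp
      rw [harg]
    · by_cases hc2 : c = ')'
      · subst hc2
        cases stk with
        | nil =>
          rw [show pvR (')' :: cs) [] acc = pvR cs [] (acc ++ [" RPRN "]) from by simp [pvR]]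
          rw [ih [] (acc ++ [" RPRN "]) (by simp)
                (pvBal_snoc hacc (by decide) (by decide))]
          have harg : pvGlue [] (acc ++ [" RPRN "]) ++ pvPass1 cs ([] : List (List String)).length
              = pvGlue [] acc ++ pvPass1 (')' :: cs) ([] : List (List String)).length := by
            rw [show pvPass1 (')' :: cs) ([] : List (List String)).length
                  = " RPRN " :: pvPass1 cs 0 from by simp [pvPass1]]
            simp [pvGlue]
          rw [harg]
        | cons a stk' =>
          rw [show pvR (')' :: cs) (a :: stk') acc
                = pvR cs stk' (a ++ "(" :: acc ++ [")"]) from by simp [pvR]]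
          rw [ih stk' (a ++ "(" :: acc ++ [")"])
                (fun x hx => hstk x (List.mem_cons_of_mem _ hx))
                (pvBal_wrap (hstk a List.mem_cons_self) hacc)]
          have hE : pvGlue stk' (a ++ "(" :: acc ++ [")"]) = pvGlue (a :: stk') acc ++ [")"] := by
            rw [show a ++ "(" :: acc ++ [")"] = (a ++ "(" :: acc) ++ [")"] by simp, pvGlue_append]
            rfl
          have harg : pvGlue stk' (a ++ "(" :: acc ++ [")"]) ++ pvPass1 cs stk'.length
              = pvGlue (a :: stk') acc ++ pvPass1 (')' :: cs) (a :: stk').length := by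
            rw [hE, show pvPass1 (')' :: cs) (a :: stk').length
                  = ")" :: pvPass1 cs stk'.length from by simp [pvPass1]]
            simp
          rw [harg]
      · rw [show pvR (c :: cs) stk acc = pvR cs stk (acc ++ [c.toString]) from by
              simp [pvR, hc1, hc2]]
        have hs1 : c.toString ≠ ")" := fun h =>
          hc2 (pvToString_inj (h.trans (by decide : (")" : String) = ')'.toString)))
        have hs2 : c.toString ≠ "(" := fun h =>
          hc1 (pvToString_inj (h.trans (by decide : ("(" : String) = '('.toString)))
        rw [ih stk (acc ++ [c.toString]) hstk (pvBal_snoc hacc hs1 hs2)]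
        have harg : pvGlue stk (acc ++ [c.toString]) ++ pvPass1 cs stk.length
            = pvGlue stk acc ++ pvPass1 (c :: cs) stk.length := by
          rw [pvGlue_append, show pvPass1 (c :: cs) stk.length
                = c.toString :: pvPass1 cs stk.length from by simp [pvPass1, hc1, hc2]]
          simp
        rw [harg]

theorem pvFinishA_append (q : List (String × Int)) (c : String) (i : Int) (E : List String) :
    pvFinishA (q ++ [(c, i)]) E =
      (if c = "(" then (pvFinishA q E).set i.toNat " RPRN "
       else if c = ")" then (pvFinishA q E).set i.toNat " LPRN " else pvFinishA q E) := by
  induction q generalizing E with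
  | nil => rfl
  | cons p q ih =>
    obtain ⟨pc, pi⟩ := p
    simp only [List.cons_append, pvFinishA]
    exact ih _

theorem pvFinishA_Qs (stk : List (List String)) : ∀ acc : List String,
    pvFinishA (pvQs stk) (pvGlue stk acc) = pvFin stk acc := by
  induction stk with
  | nil => intro acc; rfl
  | cons t rest ih =>
    intro acc
    rw [show pvQs (t :: rest) = pvQs rest ++ [((")" : String), ((pvGlue rest t).length : Int))]
          from rfl,
        pvFinishA_append,
        show pvGlue (t :: rest) acc = pvGlue rest (t ++ "(" :: acc) from rfl, ih,
        show pvFin rest (t ++ "(" :: acc) = pvFin rest t ++ "(" :: acc from by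
          rw [show t ++ "(" :: acc = (t ++ ["("]) ++ acc by simp, pvFin_append, pvFin_append]
          simp,
        if_neg (by decide : ¬ ((")" : String) = "(")), if_pos rfl,
        show (((pvGlue rest t).length : Int)).toNat = (pvFin rest t).length from by
          rw [Int.toNat_natCast, pvLen_fin_glue],
        pvSet_middle, pvFin_split]

-- A-side: the loop + drain equals the machine
theorem pvLA (cs : List Char) : ∀ (stk : List (List String)) (acc : List String),
    pvFinishA (pvLoopA (PySem.List.enumerate cs ((pvGlue stk acc).length : Int))
        (pvGlue stk acc ++ cs.map Char.toString, pvQs stk)).2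
      (pvLoopA (PySem.List.enumerate cs ((pvGlue stk acc).length : Int))
        (pvGlue stk acc ++ cs.map Char.toString, pvQs stk)).1
    = pvR cs stk acc := by
  induction cs with
  | nil =>
    intro stk acc
    show pvFinishA (pvQs stk) (pvGlue stk acc ++ ([] : List Char).map Char.toString)
        = pvR [] stk acc
    rw [List.map_nil, List.append_nil]
    exact pvFinishA_Qs stk acc
  | cons c cs ih =>
    intro stk acc
    rw [PySem.List.enumerate_cons, List.map_cons]
    by_cases hc1 : c = '('
    · subst hc1
      rw [show pvR ('(' :: cs) stk acc = pvR cs (acc :: stk) [] from by simp [pvR]]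
      rw [show pvLoopA ((((pvGlue stk acc).length : Int), '(')
              :: PySem.List.enumerate cs (((pvGlue stk acc).length : Int) + 1))
            (pvGlue stk acc ++ '('.toString :: cs.map Char.toString, pvQs stk)
          = pvLoopA (PySem.List.enumerate cs (((pvGlue stk acc).length : Int) + 1))
            (pvGlue stk acc ++ '('.toString :: cs.map Char.toString,
             pvQs stk ++ [((")" : String), ((pvGlue stk acc).length : Int))]) from by
          simp [pvLoopA]]
      rw [show pvGlue stk acc ++ '('.toString :: cs.map Char.toString
            = pvGlue (acc :: stk) [] ++ cs.map Char.toString from by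
          rw [show '('.toString = "(" from by decide, pvGlue_split]; simp]
      rw [show pvQs stk ++ [((")" : String), ((pvGlue stk acc).length : Int))]
            = pvQs (acc :: stk) from rfl]
      rw [show ((pvGlue stk acc).length : Int) + 1 = ((pvGlue (acc :: stk) []).length : Int)
            from by rw [pvGlue_split]; simp]
      exact ih (acc :: stk) []
    · by_cases hc2 : c = ')'
      · subst hc2
        cases stk with
        | nil =>
          rw [show pvR (')' :: cs) [] acc = pvR cs [] (acc ++ [" RPRN "]) from by simp [pvR]]
          rw [show pvLoopA ((((pvGlue [] acc).length : Int), ')')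
                  :: PySem.List.enumerate cs (((pvGlue [] acc).length : Int) + 1))
                (pvGlue [] acc ++ ')'.toString :: cs.map Char.toString, pvQs [])
              = pvLoopA (PySem.List.enumerate cs (((pvGlue [] acc).length : Int) + 1))
                ((pvGlue [] acc ++ ')'.toString :: cs.map Char.toString).set
                  ((pvGlue [] acc).length : Int).toNat " RPRN ", pvQs []) from by
              simp [pvLoopA, pvQs, PySem.List.pop?, PySem.List.pyIdx?]]
          rw [show ((pvGlue [] acc).length : Int).toNat = (pvGlue [] acc).length
                from Int.toNat_natCast _]
          rw [show ')'.toString = ")" from by decide]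
          rw [show (pvGlue [] acc ++ ")" :: cs.map Char.toString).set
                (pvGlue [] acc).length " RPRN "
              = pvGlue [] (acc ++ [" RPRN "]) ++ cs.map Char.toString from by
            rw [pvSet_middle]; show acc ++ " RPRN " :: _ = (acc ++ [" RPRN "]) ++ _; simp]
          rw [show ((pvGlue [] acc).length : Int) + 1
                = ((pvGlue [] (acc ++ [" RPRN "])).length : Int) from by
              show ((acc.length : Int)) + 1 = (((acc ++ [" RPRN "]).length : Int)); simp]
          exact ih [] (acc ++ [" RPRN "])
        | cons a stk' =>
          rw [show pvR (')' :: cs) (a :: stk') acc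
                = pvR cs stk' (a ++ "(" :: acc ++ [")"]) from by simp [pvR]]
          have hE : pvGlue stk' (a ++ "(" :: acc ++ [")"]) = pvGlue (a :: stk') acc ++ [")"] := by
            rw [show a ++ "(" :: acc ++ [")"] = (a ++ "(" :: acc) ++ [")"] by simp, pvGlue_append]
            rfl
          rw [show pvLoopA ((((pvGlue (a :: stk') acc).length : Int), ')')
                  :: PySem.List.enumerate cs (((pvGlue (a :: stk') acc).length : Int) + 1))
                (pvGlue (a :: stk') acc ++ ')'.toString :: cs.map Char.toString, pvQs (a :: stk'))
              = pvLoopA (PySem.List.enumerate cs (((pvGlue (a :: stk') acc).length : Int) + 1))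
                (pvGlue (a :: stk') acc ++ ')'.toString :: cs.map Char.toString, pvQs stk')
              from by
              rw [show pvQs (a :: stk')
                    = pvQs stk' ++ [((")" : String), ((pvGlue stk' a).length : Int))] from rfl]
              simp [pvLoopA, PySem.List.pop?_last]
              intro h
              exact absurd (by decide : String.singleton ')' = ")") h]
          rw [show pvGlue (a :: stk') acc ++ ')'.toString :: cs.map Char.toString
                = pvGlue stk' (a ++ "(" :: acc ++ [")"]) ++ cs.map Char.toString from by
              rw [hE, show ')'.toString = ")" from by decide]; simp]
          rw [show ((pvGlue (a :: stk') acc).length : Int) + 1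
                = ((pvGlue stk' (a ++ "(" :: acc ++ [")"])).length : Int) from by
              rw [hE]; simp]
          exact ih stk' (a ++ "(" :: acc ++ [")"])
      · rw [show pvR (c :: cs) stk acc = pvR cs stk (acc ++ [c.toString]) from by
              simp [pvR, hc1, hc2]]
        rw [show pvLoopA ((((pvGlue stk acc).length : Int), c)
                :: PySem.List.enumerate cs (((pvGlue stk acc).length : Int) + 1))
              (pvGlue stk acc ++ c.toString :: cs.map Char.toString, pvQs stk)
            = pvLoopA (PySem.List.enumerate cs (((pvGlue stk acc).length : Int) + 1))
              (pvGlue stk acc ++ c.toString :: cs.map Char.toString, pvQs stk) from by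
            simp [pvLoopA, hc1, hc2]]
        rw [show pvGlue stk acc ++ c.toString :: cs.map Char.toString
              = pvGlue stk (acc ++ [c.toString]) ++ cs.map Char.toString from by
            rw [pvGlue_append]; simp]
        rw [show ((pvGlue stk acc).length : Int) + 1
              = ((pvGlue stk (acc ++ [c.toString])).length : Int) from by
            rw [pvGlue_append]; simp]
        exact ih stk (acc ++ [c.toString])

-- ===== VERDICT (by name: the statement is the Claim_ definition above) =====
theorem convert_orphan_parentheses_spec : Claim_equal_convert_orphan_parentheses := by
  intro s _
  show convert_orphan_parentheses s = _
  unfold convert_orphan_parentheses convert_orphan_parentheses_alt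
  show PySem.Str.join "" (pvFinishA (pvLoopA (PySem.List.enumerate s.toList 0)
        (s.toList.map Char.toString, [])).2
        (pvLoopA (PySem.List.enumerate s.toList 0) (s.toList.map Char.toString, [])).1) = _
  have hA := pvLA s.toList [] []
  have hB := pvLB s.toList [] [] (by simp) pvBal_nil
  simp only [pvGlue, List.foldl_nil, pvQs, List.length_nil, Nat.cast_zero, List.nil_append] at hA hB
  rw [hA, hB, pvPass2_eq_P2]
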